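-- pv_equiv track=rewrite | github.com/jeffhank/N-Queens | nqueens.py | f
-- ===== SOURCE A (Python) =====
-- def f(state, boulderX, boulderY):
--     fscore = 0
--     for i, item in enumerate(state):
--         attacked = False
--         # check row to right
--         for j in range(i + 1, len(state)):
--             if j == boulderX and item == boulderY:
--                 break
--             if state[j] == item:
--                 fscore = fscore + 1
--                 attacked = True
--                 break
--         if not attacked:
--             # check row to left
--             for j in range(i - 1, -1, -1):
--                 if j == boulderX and item == boulderY:
--                     break
--                 if state[j] == item:
--                     fscore = fscore + 1
--                     attacked = True
--                     break
--         if not attacked: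
--             # check diagonal upright
--             row = item + 1
--             for j in range(i + 1, len(state)):
--                 if row < len(state):
--                     if j == boulderX and row == boulderY:
--                         break
--                     if state[j] == row:
--                         fscore = fscore + 1
--                         attacked = True
--                         break
--                     row = row + 1
--                 else:
--                     break
--         if not attacked:
--             # check diagonal downright
--             row = item - 1
--             for j in range(i + 1, len(state)):
--                 if row >= 0:
--                     if j == boulderX and row == boulderY:
--                         break
--                     if state[j] == row:
--                         fscore = fscore + 1
--                         attacked = True
--                         break
--                     row = row - 1
--                 else:
--                     break
--         if not attacked:
--             # check diagonal upleft
--             row = item + 1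
--             for j in range(i - 1, -1, -1):
--                 if row < len(state):
--                     if j == boulderX and row == boulderY:
--                         break
--                     if state[j] == row:
--                         fscore = fscore + 1
--                         attacked = True
--                         break
--                     row = row + 1
--                 else:
--                     break
--         if not attacked:
--             # check diagonal downleft
--             row = item - 1
--             for j in range(i - 1, -1, -1):
--                 if row >= 0:
--                     if j == boulderX and row == boulderY:
--                         break
--                     if state[j] == row:
--                         fscore = fscore + 1
--                         attacked = True
--                         break
--                     row = row - 1
--                 else:
--                     break
--     return fscore
-- ===== SOURCE B (Python) =====
-- def _nearest_next(keys):
--     # nxt[j] = smallest j' > j with keys[j'] == keys[j], else None  (right-to-left pass)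
--     n = len(keys)
--     nxt = [None] * n
--     last = {}
--     for j in range(n - 1, -1, -1):
--         k = keys[j]
--         nxt[j] = last.get(k)
--         last[k] = j
--     return nxt
--
--
-- def _nearest_prev(keys):
--     # prv[j] = largest j' < j with keys[j'] == keys[j], else None  (left-to-right pass)
--     n = len(keys)
--     prv = [None] * n
--     last = {}
--     for j in range(n):
--         k = keys[j]
--         prv[j] = last.get(k)
--         last[k] = j
--     return prv
--
--
-- def f(state, boulderX, boulderY):
--     n = len(state)
--     diag = [state[j] - j for j in range(n)]
--     anti = [state[j] + j for j in range(n)]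
--     nR, pR = _nearest_next(state), _nearest_prev(state)
--     nD, pD = _nearest_next(diag), _nearest_prev(diag)
--     nA, pA = _nearest_next(anti), _nearest_prev(anti)
--     count = 0
--     for i, item in enumerate(state):
--         rR, lR = nR[i], pR[i]
--         rD, lD = nD[i], pD[i]
--         rA, lA = nA[i], pA[i]
--         attacked = (
--             (rR is not None and not (item == boulderY and i < boulderX <= rR)) or
--             (lR is not None and not (item == boulderY and lR <= boulderX < i)) or
--             (rD is not None and state[rD] < n
--              and not (boulderY == item + (boulderX - i) and i < boulderX <= rD)) or
--             (rA is not None and state[rA] >= 0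
--              and not (boulderY == item - (boulderX - i) and i < boulderX <= rA)) or
--             (lA is not None and state[lA] < n
--              and not (boulderY == item + (i - boulderX) and lA <= boulderX < i)) or
--             (lD is not None and state[lD] >= 0
--              and not (boulderY == item - (i - boulderX) and lD <= boulderX < i))
--         )
--         if attacked:
--             count += 1
--     return count
-- ===== Notes on version B (the rewrite author's own statement) =====
-- stated objective: faster
-- what changed: A rescans the board in six directions for every queen with break-on-boulder loops (quadratic); B precomputes, in six linear last-seen-dictionary passes, each queen's nearest same-row / same-diagonal / same-anti-diagonal neighbour on either side, and decides each attack with an O(1) board-guard and boulder-blocking comparison.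
import Mathlib
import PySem

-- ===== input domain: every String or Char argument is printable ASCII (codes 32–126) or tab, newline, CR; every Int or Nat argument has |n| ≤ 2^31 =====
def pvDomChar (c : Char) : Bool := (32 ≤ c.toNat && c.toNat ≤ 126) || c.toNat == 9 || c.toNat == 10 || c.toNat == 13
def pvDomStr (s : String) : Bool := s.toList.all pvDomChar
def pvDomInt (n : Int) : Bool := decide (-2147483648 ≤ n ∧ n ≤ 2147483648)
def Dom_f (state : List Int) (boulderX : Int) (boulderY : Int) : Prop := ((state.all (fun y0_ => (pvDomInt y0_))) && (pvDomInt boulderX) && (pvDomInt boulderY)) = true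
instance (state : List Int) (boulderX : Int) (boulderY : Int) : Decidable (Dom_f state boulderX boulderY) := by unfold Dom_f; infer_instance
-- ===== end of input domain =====

-- B replaces A's per-queen directional rescans (quadratic) by six linear nearest-equal-key
-- passes over row / diagonal / anti-diagonal keys plus O(1) blocking tests per queen.
-- ===== PORT A =====
-- 'for j in range(i+1, len(state))' of the row-to-right check
def loopR (st : List Int) (bX bY item : Int) (j : Nat) : Bool :=
  if _h : j < st.length then
    if (j : Int) = bX ∧ item = bY then false
    else if st.getD j 0 = item then true
    else loopR st bX bY item (j + 1)
  else false
termination_by st.length - j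

-- 'for j in range(i-1, -1, -1)' of the row-to-left check (argument j is the current index)
def loopL (st : List Int) (bX bY item : Int) : Nat → Bool
  | 0 =>
    if ((0 : Nat) : Int) = bX ∧ item = bY then false
    else if st.getD 0 0 = item then true
    else false
  | (k + 1) =>
    if ((k + 1 : Nat) : Int) = bX ∧ item = bY then false
    else if st.getD (k + 1) 0 = item then true
    else loopL st bX bY item k

-- diagonal upright
def loopUR (st : List Int) (bX bY : Int) (j : Nat) (row : Int) : Bool :=
  if _h : j < st.length then
    if row < (st.length : Int) then
      if (j : Int) = bX ∧ row = bY then false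
      else if st.getD j 0 = row then true
      else loopUR st bX bY (j + 1) (row + 1)
    else false
  else false
termination_by st.length - j

-- diagonal downright
def loopDR (st : List Int) (bX bY : Int) (j : Nat) (row : Int) : Bool :=
  if _h : j < st.length then
    if 0 ≤ row then
      if (j : Int) = bX ∧ row = bY then false
      else if st.getD j 0 = row then true
      else loopDR st bX bY (j + 1) (row - 1)
    else false
  else false
termination_by st.length - j

-- diagonal upleft
def loopUL (st : List Int) (bX bY : Int) : Nat → Int → Bool
  | 0, row =>
    if row < (st.length : Int) then
      if ((0 : Nat) : Int) = bX ∧ row = bY then false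
      else if st.getD 0 0 = row then true
      else false
    else false
  | (k + 1), row =>
    if row < (st.length : Int) then
      if ((k + 1 : Nat) : Int) = bX ∧ row = bY then false
      else if st.getD (k + 1) 0 = row then true
      else loopUL st bX bY k (row + 1)
    else false

-- diagonal downleft
def loopDL (st : List Int) (bX bY : Int) : Nat → Int → Bool
  | 0, row =>
    if 0 ≤ row then
      if ((0 : Nat) : Int) = bX ∧ row = bY then false
      else if st.getD 0 0 = row then true
      else false
    else false
  | (k + 1), row =>
    if 0 ≤ row then
      if ((k + 1 : Nat) : Int) = bX ∧ row = bY then false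
      else if st.getD (k + 1) 0 = row then true
      else loopDL st bX bY k (row - 1)
    else false

-- the three left scans start at index i-1 (empty when i = 0)
def loopLFrom (st : List Int) (bX bY item : Int) (i : Nat) : Bool :=
  match i with
  | 0 => false
  | k + 1 => loopL st bX bY item k

def loopULFrom (st : List Int) (bX bY : Int) (i : Nat) (row : Int) : Bool :=
  match i with
  | 0 => false
  | k + 1 => loopUL st bX bY k row

def loopDLFrom (st : List Int) (bX bY : Int) (i : Nat) (row : Int) : Bool :=
  match i with
  | 0 => false
  | k + 1 => loopDL st bX bY k row

def f (state : List Int) (boulderX : Int) (boulderY : Int) : Int :=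
  (List.range state.length).foldl
    (fun fscore i =>
      let item := state.getD i 0
      let a1 := loopR state boulderX boulderY item (i + 1)
      let a2 := if a1 then true else loopLFrom state boulderX boulderY item i
      let a3 := if a2 then true else loopUR state boulderX boulderY (i + 1) (item + 1)
      let a4 := if a3 then true else loopDR state boulderX boulderY (i + 1) (item - 1)
      let a5 := if a4 then true else loopULFrom state boulderX boulderY i (item + 1)
      let a6 := if a5 then true else loopDLFrom state boulderX boulderY i (item - 1)
      if a6 then fscore + 1 else fscore)
    0

-- ===== PORT B =====
-- right-to-left pass of _nearest_next (j is the current index, last maps key → nearest index seen)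
def nxtGo (keys : List Int) (j : Nat) (last : PySem.Dict Int Nat) (acc : List (Option Nat)) :
    List (Option Nat) :=
  let k := keys.getD j 0
  let acc' := last.get? k :: acc
  let last' := last.insert k j
  match j with
  | 0 => acc'
  | j' + 1 => nxtGo keys j' last' acc'

def nearestNext (keys : List Int) : List (Option Nat) :=
  match keys.length with
  | 0 => []
  | n + 1 => nxtGo keys n PySem.Dict.empty []

-- left-to-right pass of _nearest_prev
def prvGo (keys : List Int) (j : Nat) (last : PySem.Dict Int Nat) (acc : List (Option Nat)) :
    List (Option Nat) :=
  if _h : j < keys.length then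
    let k := keys.getD j 0
    prvGo keys (j + 1) (last.insert k j) (acc ++ [last.get? k])
  else acc
termination_by keys.length - j

def nearestPrev (keys : List Int) : List (Option Nat) :=
  prvGo keys 0 PySem.Dict.empty []

def f_alt (state : List Int) (boulderX : Int) (boulderY : Int) : Int :=
  let n := state.length
  let diag := (List.range n).map (fun j => state.getD j 0 - (j : Int))
  let anti := (List.range n).map (fun j => state.getD j 0 + (j : Int))
  let nR := nearestNext state
  let pR := nearestPrev state
  let nD := nearestNext diag
  let pD := nearestPrev diag
  let nA := nearestNext anti
  let pA := nearestPrev anti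
  (List.range n).foldl
    (fun count i =>
      let item := state.getD i 0
      let attacked :=
        (match nR.getD i none with
         | none => false
         | some r => !decide (item = boulderY ∧ (i : Int) < boulderX ∧ boulderX ≤ (r : Int))) ||
        (match pR.getD i none with
         | none => false
         | some l => !decide (item = boulderY ∧ (l : Int) ≤ boulderX ∧ boulderX < (i : Int))) ||
        (match nD.getD i none with
         | none => false
         | some r => decide (state.getD r 0 < (n : Int)) &&
             !decide (boulderY = item + (boulderX - (i : Int)) ∧ (i : Int) < boulderX ∧ boulderX ≤ (r : Int))) ||
        (match nA.getD i none with
         | none => false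
         | some r => decide (0 ≤ state.getD r 0) &&
             !decide (boulderY = item - (boulderX - (i : Int)) ∧ (i : Int) < boulderX ∧ boulderX ≤ (r : Int))) ||
        (match pA.getD i none with
         | none => false
         | some l => decide (state.getD l 0 < (n : Int)) &&
             !decide (boulderY = item + ((i : Int) - boulderX) ∧ (l : Int) ≤ boulderX ∧ boulderX < (i : Int))) ||
        (match pD.getD i none with
         | none => false
         | some l => decide (0 ≤ state.getD l 0) &&
             !decide (boulderY = item - ((i : Int) - boulderX) ∧ (l : Int) ≤ boulderX ∧ boulderX < (i : Int)))
      if attacked then count + 1 else count)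
    0


-- ===== PRECONDITION & SPEC =====
def Spec_f (state : List Int) (boulderX : Int) (boulderY : Int) (out : Int) : Prop := out = f_alt state boulderX boulderY
instance (state : List Int) (boulderX : Int) (boulderY : Int) (out : Int) : Decidable (Spec_f state boulderX boulderY out) := by unfold Spec_f; infer_instance

-- ===== CLAIM (what is proved, stated in full; the proofs are below) =====
def Claim_equal_f : Prop := ∀ (state : List Int) (boulderX : Int) (boulderY : Int), Dom_f state boulderX boulderY → Spec_f state boulderX boulderY (f state boulderX boulderY)

-- ===== LEMMAS AND PROOFS =====
-- first index k in [j, n) with p k, and last index k < j with p k (proof-side characterisations)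
def firstFrom (p : Nat → Bool) (n : Nat) (j : Nat) : Option Nat :=
  if _h : j < n then
    if p j then some j else firstFrom p n (j + 1)
  else none
termination_by n - j

def lastB (p : Nat → Bool) : Nat → Option Nat
  | 0 => none
  | k + 1 => if p k then some k else lastB p k

theorem firstFrom_some {p : Nat → Bool} {n : Nat} : ∀ {j r : Nat},
    firstFrom p n j = some r → j ≤ r ∧ r < n ∧ p r = true := by
  intro j
  induction hm : n - j using Nat.strong_induction_on generalizing j with
  | _ m ih =>
    intro r h
    rw [firstFrom] at h
    by_cases hj : j < n
    · rw [dif_pos hj] at h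
      by_cases hp : p j
      · simp [hp] at h; subst h; exact ⟨Nat.le_refl _, hj, hp⟩
      · simp [hp] at h
        obtain ⟨h1, h2, h3⟩ := ih (n - (j+1)) (by omega) rfl h
        exact ⟨by omega, h2, h3⟩
    · rw [dif_neg hj] at h; exact absurd h (by simp)

theorem lastB_some {p : Nat → Bool} : ∀ {j l : Nat},
    lastB p j = some l → l < j ∧ p l = true := by
  intro j
  induction j with
  | zero => intro l h; exact absurd h (by simp [lastB])
  | succ k ih =>
    intro l h
    rw [lastB] at h
    by_cases hp : p k
    · simp [hp] at h; subst h; exact ⟨by omega, hp⟩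
    · simp [hp] at h; obtain ⟨h1, h2⟩ := ih h; exact ⟨by omega, h2⟩

theorem firstFrom_congr {p q : Nat → Bool} {n : Nat} (h : ∀ k, k < n → p k = q k) :
    ∀ j, firstFrom p n j = firstFrom q n j := by
  intro j
  induction hm : n - j using Nat.strong_induction_on generalizing j with
  | _ m ih =>
    rw [firstFrom]
    conv_rhs => rw [firstFrom]
    by_cases hj : j < n
    · rw [dif_pos hj, dif_pos hj, h j hj]
      by_cases hq : q j
      · simp [hq]
      · simp [hq]; exact ih (n - (j+1)) (by omega) (j+1) rfl
    · rw [dif_neg hj, dif_neg hj]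

theorem lastB_congr {p q : Nat → Bool} : ∀ j, (∀ k, k < j → p k = q k) →
    lastB p j = lastB q j := by
  intro j
  induction j with
  | zero => intro _; rfl
  | succ k ih =>
    intro h
    rw [lastB, lastB, h k (by omega)]
    by_cases hq : q k
    · simp [hq]
    · simp [hq]; exact ih (fun m hm => h m (by omega))

theorem loopR_spec (st : List Int) (bX bY item : Int) : ∀ j : Nat,
    loopR st bX bY item j =
      match firstFrom (fun k => decide (st.getD k 0 = item)) st.length j with
      | none => false
      | some r => !decide (item = bY ∧ (j : Int) ≤ bX ∧ bX ≤ (r : Int)) := by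
  intro j
  induction hm : st.length - j using Nat.strong_induction_on generalizing j with
  | _ m ih =>
    rw [loopR, firstFrom]
    by_cases hj : j < st.length
    · rw [dif_pos hj, dif_pos hj]
      by_cases hb : ((j : Int) = bX ∧ item = bY)
      · rw [if_pos hb]
        by_cases hp : st.getD j 0 = item
        · have hP : (item = bY ∧ (j : Int) ≤ bX ∧ bX ≤ (j : Int)) :=
            ⟨hb.2, by omega, by omega⟩
          simp only [hp, decide_true, if_true]
          rw [decide_eq_true hP]; rfl
        · simp only [hp, decide_false, Bool.false_eq_true, if_false]
          cases hr : firstFrom (fun k => decide (st.getD k 0 = item)) st.length (j+1) with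
          | none => rfl
          | some r =>
            obtain ⟨h1, h2, h3⟩ := firstFrom_some hr
            have hP : (item = bY ∧ (j : Int) ≤ bX ∧ bX ≤ (r : Int)) :=
              ⟨hb.2, by omega, by omega⟩
            show false = !decide (item = bY ∧ (j : Int) ≤ bX ∧ bX ≤ (r : Int))
            rw [decide_eq_true hP]; rfl
      · rw [if_neg hb]
        by_cases hp : st.getD j 0 = item
        · have hP : ¬ (item = bY ∧ (j : Int) ≤ bX ∧ bX ≤ (j : Int)) := by
            rintro ⟨e1, e2, e3⟩; exact hb ⟨by omega, e1⟩
          rw [if_pos hp]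
          simp only [hp, decide_true, if_true]
          rw [decide_eq_false hP]; rfl
        · rw [if_neg hp]
          simp only [hp, decide_false, Bool.false_eq_true, if_false]
          rw [ih (st.length - (j+1)) (by omega) (j+1) rfl]
          cases hr : firstFrom (fun k => decide (st.getD k 0 = item)) st.length (j+1) with
          | none => rfl
          | some r =>
            show (!decide (item = bY ∧ ((j+1 : Nat) : Int) ≤ bX ∧ bX ≤ (r : Int))) = !decide (item = bY ∧ (j : Int) ≤ bX ∧ bX ≤ (r : Int))
            congr 1
            apply decide_eq_decide.mpr
            constructor
            · rintro ⟨e1, e2, e3⟩; exact ⟨e1, by omega, e3⟩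
            · rintro ⟨e1, e2, e3⟩
              refine ⟨e1, ?_, e3⟩
              have : (j : Int) ≠ bX := fun hc => hb ⟨hc, e1⟩
              omega
    · rw [dif_neg hj, dif_neg hj]

theorem loopL_spec (st : List Int) (bX bY item : Int) : ∀ j : Nat,
    loopL st bX bY item j =
      match lastB (fun k => decide (st.getD k 0 = item)) (j+1) with
      | none => false
      | some l => !decide (item = bY ∧ (l : Int) ≤ bX ∧ bX ≤ (j : Int)) := by
  intro j
  induction j with
  | zero =>
    rw [loopL]
    simp only [lastB]
    by_cases hb : (((0 : Nat) : Int) = bX ∧ item = bY)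
    · rw [if_pos hb]
      by_cases hp : st.getD 0 0 = item
      · have hP : (item = bY ∧ ((0 : Nat) : Int) ≤ bX ∧ bX ≤ ((0 : Nat) : Int)) :=
          ⟨hb.2, by omega, by omega⟩
        simp only [hp, decide_true, if_true]
        show false = !decide (item = bY ∧ ((0 : Nat) : Int) ≤ bX ∧ bX ≤ ((0 : Nat) : Int))
        rw [decide_eq_true hP]; rfl
      · simp only [hp, decide_false, Bool.false_eq_true, if_false]
    · rw [if_neg hb]
      by_cases hp : st.getD 0 0 = item
      · have hP : ¬ (item = bY ∧ ((0 : Nat) : Int) ≤ bX ∧ bX ≤ ((0 : Nat) : Int)) := by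
          rintro ⟨e1, e2, e3⟩; exact hb ⟨by omega, e1⟩
        rw [if_pos hp]
        simp only [hp, decide_true, if_true]
        show true = !decide (item = bY ∧ ((0 : Nat) : Int) ≤ bX ∧ bX ≤ ((0 : Nat) : Int))
        rw [decide_eq_false hP]; rfl
      · rw [if_neg hp]
        simp only [hp, decide_false, Bool.false_eq_true, if_false]
  | succ k ih =>
    rw [loopL]
    show _ =
      match (if decide (st.getD (k+1) 0 = item) then some (k+1)
             else lastB (fun k' => decide (st.getD k' 0 = item)) (k+1)) with
      | none => false
      | some l => !decide (item = bY ∧ (l : Int) ≤ bX ∧ bX ≤ ((k+1 : Nat) : Int))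
    by_cases hb : (((k + 1 : Nat) : Int) = bX ∧ item = bY)
    · rw [if_pos hb]
      by_cases hp : st.getD (k+1) 0 = item
      · simp only [hp, decide_true, if_true]
        have hP : (item = bY ∧ ((k+1 : Nat) : Int) ≤ bX ∧ bX ≤ ((k+1 : Nat) : Int)) :=
          ⟨hb.2, by omega, by omega⟩
        show false = !decide (item = bY ∧ ((k+1 : Nat) : Int) ≤ bX ∧ bX ≤ ((k+1 : Nat) : Int))
        rw [decide_eq_true hP]; rfl
      · simp only [hp, decide_false, Bool.false_eq_true, if_false]
        cases hr : lastB (fun k' => decide (st.getD k' 0 = item)) (k+1) with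
        | none => rfl
        | some l =>
          obtain ⟨h1, h2⟩ := lastB_some hr
          have hP : (item = bY ∧ (l : Int) ≤ bX ∧ bX ≤ ((k+1 : Nat) : Int)) :=
            ⟨hb.2, by omega, by omega⟩
          show false = !decide (item = bY ∧ (l : Int) ≤ bX ∧ bX ≤ ((k+1 : Nat) : Int))
          rw [decide_eq_true hP]; rfl
    · rw [if_neg hb]
      by_cases hp : st.getD (k+1) 0 = item
      · rw [if_pos hp]
        simp only [hp, decide_true, if_true]
        have hP : ¬ (item = bY ∧ ((k+1 : Nat) : Int) ≤ bX ∧ bX ≤ ((k+1 : Nat) : Int)) := by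
          rintro ⟨e1, e2, e3⟩; exact hb ⟨by omega, e1⟩
        show true = !decide (item = bY ∧ ((k+1 : Nat) : Int) ≤ bX ∧ bX ≤ ((k+1 : Nat) : Int))
        rw [decide_eq_false hP]; rfl
      · rw [if_neg hp]
        simp only [hp, decide_false, Bool.false_eq_true, if_false]
        rw [ih]
        cases hr : lastB (fun k' => decide (st.getD k' 0 = item)) (k+1) with
        | none => rfl
        | some l =>
          show (!decide (item = bY ∧ (l : Int) ≤ bX ∧ bX ≤ ((k : Nat) : Int)))
             = !decide (item = bY ∧ (l : Int) ≤ bX ∧ bX ≤ ((k+1 : Nat) : Int))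
          congr 1
          apply decide_eq_decide.mpr
          constructor
          · rintro ⟨e1, e2, e3⟩; exact ⟨e1, e2, by omega⟩
          · rintro ⟨e1, e2, e3⟩
            refine ⟨e1, e2, ?_⟩
            have : ((k+1 : Nat) : Int) ≠ bX := fun hc => hb ⟨hc, e1⟩
            omega

theorem loopUR_spec (st : List Int) (bX bY : Int) : ∀ (j : Nat) (row : Int),
    loopUR st bX bY j row =
      match firstFrom (fun k => decide (st.getD k 0 = row + ((k : Int) - (j : Int)))) st.length j with
      | none => false
      | some r => decide (st.getD r 0 < (st.length : Int)) &&
          !decide (bY = row + (bX - (j : Int)) ∧ (j : Int) ≤ bX ∧ bX ≤ (r : Int)) := by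
  intro j
  induction hm : st.length - j using Nat.strong_induction_on generalizing j with
  | _ m ih =>
    intro row
    rw [loopUR, firstFrom]
    by_cases hj : j < st.length
    · rw [dif_pos hj, dif_pos hj]
      by_cases hg : row < (st.length : Int)
      · rw [if_pos hg]
        by_cases hb : ((j : Int) = bX ∧ row = bY)
        · rw [if_pos hb]
          by_cases hp : st.getD j 0 = row + ((j : Int) - (j : Int))
          · rw [decide_eq_true hp, if_pos (rfl : true = true)]
            have hP : (bY = row + (bX - (j : Int)) ∧ (j : Int) ≤ bX ∧ bX ≤ ((j : Nat) : Int)) :=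
              ⟨by omega, by omega, by omega⟩
            show false = (decide (st.getD j 0 < (st.length : Int)) &&
              !decide (bY = row + (bX - (j : Int)) ∧ (j : Int) ≤ bX ∧ bX ≤ ((j : Nat) : Int)))
            rw [decide_eq_true hP]
            simp
          · rw [decide_eq_false hp, if_neg Bool.false_ne_true]
            cases hr : firstFrom (fun k => decide (st.getD k 0 = row + ((k : Int) - (j : Int)))) st.length (j+1) with
            | none => rfl
            | some r =>
              obtain ⟨h1, h2, h3⟩ := firstFrom_some hr
              have hP : (bY = row + (bX - (j : Int)) ∧ (j : Int) ≤ bX ∧ bX ≤ ((r : Nat) : Int)) :=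
                ⟨by omega, by omega, by omega⟩
              show false = (decide (st.getD r 0 < (st.length : Int)) &&
                !decide (bY = row + (bX - (j : Int)) ∧ (j : Int) ≤ bX ∧ bX ≤ ((r : Nat) : Int)))
              rw [decide_eq_true hP]
              simp
        · rw [if_neg hb]
          by_cases hp : st.getD j 0 = row
          · have hp' : st.getD j 0 = row + ((j : Int) - (j : Int)) := by omega
            rw [if_pos hp, decide_eq_true hp', if_pos (rfl : true = true)]
            have hP : ¬ (bY = row + (bX - (j : Int)) ∧ (j : Int) ≤ bX ∧ bX ≤ ((j : Nat) : Int)) := by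
              rintro ⟨e1, e2, e3⟩
              exact hb ⟨by omega, by omega⟩
            have hlt : st.getD j 0 < (st.length : Int) := by omega
            show true = (decide (st.getD j 0 < (st.length : Int)) &&
              !decide (bY = row + (bX - (j : Int)) ∧ (j : Int) ≤ bX ∧ bX ≤ ((j : Nat) : Int)))
            rw [decide_eq_true hlt, decide_eq_false hP]
            rfl
          · have hp' : ¬ st.getD j 0 = row + ((j : Int) - (j : Int)) := by omega
            rw [if_neg hp, decide_eq_false hp', if_neg Bool.false_ne_true]
            rw [ih (st.length - (j+1)) (by omega) (j+1) rfl (row+1)]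
            have hpe : (fun k => decide (st.getD k 0 = (row+1) + ((k : Int) - ((j+1 : Nat) : Int))))
                     = (fun k => decide (st.getD k 0 = row + ((k : Int) - (j : Int)))) := by
              funext k
              apply decide_eq_decide.mpr
              constructor <;> intro h <;> omega
            rw [hpe]
            cases hr : firstFrom (fun k => decide (st.getD k 0 = row + ((k : Int) - (j : Int)))) st.length (j+1) with
            | none => rfl
            | some r =>
              show (decide (st.getD r 0 < (st.length : Int)) &&
                     !decide (bY = (row+1) + (bX - ((j+1 : Nat) : Int)) ∧ ((j+1 : Nat) : Int) ≤ bX ∧ bX ≤ (r : Int)))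
                 = (decide (st.getD r 0 < (st.length : Int)) &&
                     !decide (bY = row + (bX - (j : Int)) ∧ (j : Int) ≤ bX ∧ bX ≤ (r : Int)))
              congr 1
              congr 1
              apply decide_eq_decide.mpr
              constructor
              · rintro ⟨e1, e2, e3⟩; exact ⟨by omega, by omega, e3⟩
              · rintro ⟨e1, e2, e3⟩
                by_cases hc : (j : Int) = bX
                · exact absurd ⟨hc, by omega⟩ hb
                · exact ⟨by omega, by omega, e3⟩
      · rw [if_neg hg]
        by_cases hp : st.getD j 0 = row + ((j : Int) - (j : Int))
        · rw [decide_eq_true hp, if_pos (rfl : true = true)]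
          have hge : ¬ (st.getD j 0 < (st.length : Int)) := by omega
          show false = (decide (st.getD j 0 < (st.length : Int)) && _)
          rw [decide_eq_false hge]
          rfl
        · rw [decide_eq_false hp, if_neg Bool.false_ne_true]
          cases hr : firstFrom (fun k => decide (st.getD k 0 = row + ((k : Int) - (j : Int)))) st.length (j+1) with
          | none => rfl
          | some r =>
            obtain ⟨h1, h2, h3⟩ := firstFrom_some hr
            have h3' : st.getD r 0 = row + ((r : Int) - (j : Int)) := of_decide_eq_true h3
            have hge : ¬ (st.getD r 0 < (st.length : Int)) := by omega
            show false = (decide (st.getD r 0 < (st.length : Int)) && _)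
            rw [decide_eq_false hge]
            rfl
    · rw [dif_neg hj, dif_neg hj]

theorem loopDR_spec (st : List Int) (bX bY : Int) : ∀ (j : Nat) (row : Int),
    loopDR st bX bY j row =
      match firstFrom (fun k => decide (st.getD k 0 = row - ((k : Int) - (j : Int)))) st.length j with
      | none => false
      | some r => decide (0 ≤ st.getD r 0) &&
          !decide (bY = row - (bX - (j : Int)) ∧ (j : Int) ≤ bX ∧ bX ≤ (r : Int)) := by
  intro j
  induction hm : st.length - j using Nat.strong_induction_on generalizing j with
  | _ m ih =>
    intro row
    rw [loopDR, firstFrom]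
    by_cases hj : j < st.length
    · rw [dif_pos hj, dif_pos hj]
      by_cases hg : 0 ≤ row
      · rw [if_pos hg]
        by_cases hb : ((j : Int) = bX ∧ row = bY)
        · rw [if_pos hb]
          by_cases hp : st.getD j 0 = row - ((j : Int) - (j : Int))
          · rw [decide_eq_true hp, if_pos (rfl : true = true)]
            have hP : (bY = row - (bX - (j : Int)) ∧ (j : Int) ≤ bX ∧ bX ≤ ((j : Nat) : Int)) :=
              ⟨by omega, by omega, by omega⟩
            show false = (decide (0 ≤ st.getD j 0) &&
              !decide (bY = row - (bX - (j : Int)) ∧ (j : Int) ≤ bX ∧ bX ≤ ((j : Nat) : Int)))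
            rw [decide_eq_true hP]
            simp
          · rw [decide_eq_false hp, if_neg Bool.false_ne_true]
            cases hr : firstFrom (fun k => decide (st.getD k 0 = row - ((k : Int) - (j : Int)))) st.length (j+1) with
            | none => rfl
            | some r =>
              obtain ⟨h1, h2, h3⟩ := firstFrom_some hr
              have hP : (bY = row - (bX - (j : Int)) ∧ (j : Int) ≤ bX ∧ bX ≤ ((r : Nat) : Int)) :=
                ⟨by omega, by omega, by omega⟩
              show false = (decide (0 ≤ st.getD r 0) &&
                !decide (bY = row - (bX - (j : Int)) ∧ (j : Int) ≤ bX ∧ bX ≤ ((r : Nat) : Int)))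
              rw [decide_eq_true hP]
              simp
        · rw [if_neg hb]
          by_cases hp : st.getD j 0 = row
          · have hp' : st.getD j 0 = row - ((j : Int) - (j : Int)) := by omega
            rw [if_pos hp, decide_eq_true hp', if_pos (rfl : true = true)]
            have hP : ¬ (bY = row - (bX - (j : Int)) ∧ (j : Int) ≤ bX ∧ bX ≤ ((j : Nat) : Int)) := by
              rintro ⟨e1, e2, e3⟩
              exact hb ⟨by omega, by omega⟩
            have hlt : 0 ≤ st.getD j 0 := by omega
            show true = (decide (0 ≤ st.getD j 0) &&
              !decide (bY = row - (bX - (j : Int)) ∧ (j : Int) ≤ bX ∧ bX ≤ ((j : Nat) : Int)))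
            rw [decide_eq_true hlt, decide_eq_false hP]
            rfl
          · have hp' : ¬ st.getD j 0 = row - ((j : Int) - (j : Int)) := by omega
            rw [if_neg hp, decide_eq_false hp', if_neg Bool.false_ne_true]
            rw [ih (st.length - (j+1)) (by omega) (j+1) rfl (row-1)]
            have hpe : (fun k => decide (st.getD k 0 = (row-1) - ((k : Int) - ((j+1 : Nat) : Int))))
                     = (fun k => decide (st.getD k 0 = row - ((k : Int) - (j : Int)))) := by
              funext k
              apply decide_eq_decide.mpr
              constructor <;> intro h <;> omega
            rw [hpe]
            cases hr : firstFrom (fun k => decide (st.getD k 0 = row - ((k : Int) - (j : Int)))) st.length (j+1) with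
            | none => rfl
            | some r =>
              show (decide (0 ≤ st.getD r 0) &&
                     !decide (bY = (row-1) - (bX - ((j+1 : Nat) : Int)) ∧ ((j+1 : Nat) : Int) ≤ bX ∧ bX ≤ (r : Int)))
                 = (decide (0 ≤ st.getD r 0) &&
                     !decide (bY = row - (bX - (j : Int)) ∧ (j : Int) ≤ bX ∧ bX ≤ (r : Int)))
              congr 1
              congr 1
              apply decide_eq_decide.mpr
              constructor
              · rintro ⟨e1, e2, e3⟩; exact ⟨by omega, by omega, e3⟩
              · rintro ⟨e1, e2, e3⟩
                by_cases hc : (j : Int) = bX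
                · exact absurd ⟨hc, by omega⟩ hb
                · exact ⟨by omega, by omega, e3⟩
      · rw [if_neg hg]
        by_cases hp : st.getD j 0 = row - ((j : Int) - (j : Int))
        · rw [decide_eq_true hp, if_pos (rfl : true = true)]
          have hge : ¬ (0 ≤ st.getD j 0) := by omega
          show false = (decide (0 ≤ st.getD j 0) && _)
          rw [decide_eq_false hge]
          rfl
        · rw [decide_eq_false hp, if_neg Bool.false_ne_true]
          cases hr : firstFrom (fun k => decide (st.getD k 0 = row - ((k : Int) - (j : Int)))) st.length (j+1) with
          | none => rfl
          | some r =>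
            obtain ⟨h1, h2, h3⟩ := firstFrom_some hr
            have h3' : st.getD r 0 = row - ((r : Int) - (j : Int)) := of_decide_eq_true h3
            have hge : ¬ (0 ≤ st.getD r 0) := by omega
            show false = (decide (0 ≤ st.getD r 0) && _)
            rw [decide_eq_false hge]
            rfl
    · rw [dif_neg hj, dif_neg hj]

theorem loopUL_spec (st : List Int) (bX bY : Int) : ∀ (j : Nat) (row : Int),
    loopUL st bX bY j row =
      match lastB (fun k => decide (st.getD k 0 = row + ((j : Int) - (k : Int)))) (j+1) with
      | none => false
      | some l => decide (st.getD l 0 < (st.length : Int)) &&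
          !decide (bY = row + ((j : Int) - bX) ∧ (l : Int) ≤ bX ∧ bX ≤ (j : Int)) := by
  intro j
  induction j with
  | zero =>
    intro row
    rw [loopUL]
    simp only [lastB]
    by_cases hg : row < (st.length : Int)
    · rw [if_pos hg]
      by_cases hb : (((0 : Nat) : Int) = bX ∧ row = bY)
      · rw [if_pos hb]
        by_cases hp : st.getD 0 0 = row + (((0 : Nat) : Int) - ((0 : Nat) : Int))
        · rw [decide_eq_true hp, if_pos (rfl : true = true)]
          have hP : (bY = row + (((0 : Nat) : Int) - bX) ∧ ((0 : Nat) : Int) ≤ bX ∧ bX ≤ ((0 : Nat) : Int)) :=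
            ⟨by omega, by omega, by omega⟩
          show false = (decide (st.getD 0 0 < (st.length : Int)) &&
            !decide (bY = row + (((0 : Nat) : Int) - bX) ∧ ((0 : Nat) : Int) ≤ bX ∧ bX ≤ ((0 : Nat) : Int)))
          rw [decide_eq_true hP]
          simp
        · rw [decide_eq_false hp, if_neg Bool.false_ne_true]
      · rw [if_neg hb]
        by_cases hp : st.getD 0 0 = row
        · have hp' : st.getD 0 0 = row + (((0 : Nat) : Int) - ((0 : Nat) : Int)) := by omega
          rw [if_pos hp, decide_eq_true hp', if_pos (rfl : true = true)]
          have hP : ¬ (bY = row + (((0 : Nat) : Int) - bX) ∧ ((0 : Nat) : Int) ≤ bX ∧ bX ≤ ((0 : Nat) : Int)) := by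
            rintro ⟨e1, e2, e3⟩
            exact hb ⟨by omega, by omega⟩
          have hlt : st.getD 0 0 < (st.length : Int) := by omega
          show true = (decide (st.getD 0 0 < (st.length : Int)) &&
            !decide (bY = row + (((0 : Nat) : Int) - bX) ∧ ((0 : Nat) : Int) ≤ bX ∧ bX ≤ ((0 : Nat) : Int)))
          rw [decide_eq_true hlt, decide_eq_false hP]
          rfl
        · have hp' : ¬ st.getD 0 0 = row + (((0 : Nat) : Int) - ((0 : Nat) : Int)) := by omega
          rw [if_neg hp, decide_eq_false hp', if_neg Bool.false_ne_true]
    · rw [if_neg hg]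
      by_cases hp : st.getD 0 0 = row + (((0 : Nat) : Int) - ((0 : Nat) : Int))
      · rw [decide_eq_true hp, if_pos (rfl : true = true)]
        have hge : ¬ (st.getD 0 0 < (st.length : Int)) := by omega
        show false = (decide (st.getD 0 0 < (st.length : Int)) && _)
        rw [decide_eq_false hge]
        rfl
      · rw [decide_eq_false hp, if_neg Bool.false_ne_true]
  | succ k ih =>
    intro row
    rw [loopUL]
    show _ =
      match (if decide (st.getD (k+1) 0 = row + (((k+1 : Nat) : Int) - ((k+1 : Nat) : Int))) then some (k+1)
             else lastB (fun k' => decide (st.getD k' 0 = row + (((k+1 : Nat) : Int) - (k' : Int)))) (k+1)) with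
      | none => false
      | some l => decide (st.getD l 0 < (st.length : Int)) &&
          !decide (bY = row + (((k+1 : Nat) : Int) - bX) ∧ (l : Int) ≤ bX ∧ bX ≤ ((k+1 : Nat) : Int))
    by_cases hg : row < (st.length : Int)
    · rw [if_pos hg]
      by_cases hb : (((k+1 : Nat) : Int) = bX ∧ row = bY)
      · rw [if_pos hb]
        by_cases hp : st.getD (k+1) 0 = row + (((k+1 : Nat) : Int) - ((k+1 : Nat) : Int))
        · rw [decide_eq_true hp, if_pos (rfl : true = true)]
          have hP : (bY = row + (((k+1 : Nat) : Int) - bX) ∧ ((k+1 : Nat) : Int) ≤ bX ∧ bX ≤ ((k+1 : Nat) : Int)) :=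
            ⟨by omega, by omega, by omega⟩
          show false = (decide (st.getD (k+1) 0 < (st.length : Int)) &&
            !decide (bY = row + (((k+1 : Nat) : Int) - bX) ∧ ((k+1 : Nat) : Int) ≤ bX ∧ bX ≤ ((k+1 : Nat) : Int)))
          rw [decide_eq_true hP]
          simp
        · rw [decide_eq_false hp, if_neg Bool.false_ne_true]
          cases hr : lastB (fun k' => decide (st.getD k' 0 = row + (((k+1 : Nat) : Int) - (k' : Int)))) (k+1) with
          | none => rfl
          | some l =>
            obtain ⟨h1, h2⟩ := lastB_some hr
            have hP : (bY = row + (((k+1 : Nat) : Int) - bX) ∧ (l : Int) ≤ bX ∧ bX ≤ ((k+1 : Nat) : Int)) :=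
              ⟨by omega, by omega, by omega⟩
            show false = (decide (st.getD l 0 < (st.length : Int)) &&
              !decide (bY = row + (((k+1 : Nat) : Int) - bX) ∧ (l : Int) ≤ bX ∧ bX ≤ ((k+1 : Nat) : Int)))
            rw [decide_eq_true hP]
            simp
      · rw [if_neg hb]
        by_cases hp : st.getD (k+1) 0 = row
        · have hp' : st.getD (k+1) 0 = row + (((k+1 : Nat) : Int) - ((k+1 : Nat) : Int)) := by omega
          rw [if_pos hp, decide_eq_true hp', if_pos (rfl : true = true)]
          have hP : ¬ (bY = row + (((k+1 : Nat) : Int) - bX) ∧ ((k+1 : Nat) : Int) ≤ bX ∧ bX ≤ ((k+1 : Nat) : Int)) := by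
            rintro ⟨e1, e2, e3⟩
            exact hb ⟨by omega, by omega⟩
          have hlt : st.getD (k+1) 0 < (st.length : Int) := by omega
          show true = (decide (st.getD (k+1) 0 < (st.length : Int)) &&
            !decide (bY = row + (((k+1 : Nat) : Int) - bX) ∧ ((k+1 : Nat) : Int) ≤ bX ∧ bX ≤ ((k+1 : Nat) : Int)))
          rw [decide_eq_true hlt, decide_eq_false hP]
          rfl
        · have hp' : ¬ st.getD (k+1) 0 = row + (((k+1 : Nat) : Int) - ((k+1 : Nat) : Int)) := by omega
          rw [if_neg hp, decide_eq_false hp', if_neg Bool.false_ne_true]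
          rw [ih (row+1)]
          have hpe : (fun k' => decide (st.getD k' 0 = (row+1) + ((k : Int) - (k' : Int))))
                   = (fun k' => decide (st.getD k' 0 = row + (((k+1 : Nat) : Int) - (k' : Int)))) := by
            funext k'
            apply decide_eq_decide.mpr
            constructor <;> intro h <;> omega
          rw [hpe]
          cases hr : lastB (fun k' => decide (st.getD k' 0 = row + (((k+1 : Nat) : Int) - (k' : Int)))) (k+1) with
          | none => rfl
          | some l =>
            show (decide (st.getD l 0 < (st.length : Int)) &&
                   !decide (bY = (row+1) + ((k : Int) - bX) ∧ (l : Int) ≤ bX ∧ bX ≤ (k : Int)))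
               = (decide (st.getD l 0 < (st.length : Int)) &&
                   !decide (bY = row + (((k+1 : Nat) : Int) - bX) ∧ (l : Int) ≤ bX ∧ bX ≤ ((k+1 : Nat) : Int)))
            congr 1
            congr 1
            apply decide_eq_decide.mpr
            constructor
            · rintro ⟨e1, e2, e3⟩; exact ⟨by omega, e2, by omega⟩
            · rintro ⟨e1, e2, e3⟩
              by_cases hc : ((k+1 : Nat) : Int) = bX
              · exact absurd ⟨hc, by omega⟩ hb
              · exact ⟨by omega, e2, by omega⟩
    · rw [if_neg hg]
      by_cases hp : st.getD (k+1) 0 = row + (((k+1 : Nat) : Int) - ((k+1 : Nat) : Int))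
      · rw [decide_eq_true hp, if_pos (rfl : true = true)]
        have hge : ¬ (st.getD (k+1) 0 < (st.length : Int)) := by omega
        show false = (decide (st.getD (k+1) 0 < (st.length : Int)) && _)
        rw [decide_eq_false hge]
        rfl
      · rw [decide_eq_false hp, if_neg Bool.false_ne_true]
        cases hr : lastB (fun k' => decide (st.getD k' 0 = row + (((k+1 : Nat) : Int) - (k' : Int)))) (k+1) with
        | none => rfl
        | some l =>
          obtain ⟨h1, h2⟩ := lastB_some hr
          have h2' : st.getD l 0 = row + (((k+1 : Nat) : Int) - (l : Int)) := of_decide_eq_true h2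
          have hge : ¬ (st.getD l 0 < (st.length : Int)) := by omega
          show false = (decide (st.getD l 0 < (st.length : Int)) && _)
          rw [decide_eq_false hge]
          rfl

theorem loopDL_spec (st : List Int) (bX bY : Int) : ∀ (j : Nat) (row : Int),
    loopDL st bX bY j row =
      match lastB (fun k => decide (st.getD k 0 = row - ((j : Int) - (k : Int)))) (j+1) with
      | none => false
      | some l => decide (0 ≤ st.getD l 0) &&
          !decide (bY = row - ((j : Int) - bX) ∧ (l : Int) ≤ bX ∧ bX ≤ (j : Int)) := by
  intro j
  induction j with
  | zero =>
    intro row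
    rw [loopDL]
    simp only [lastB]
    by_cases hg : 0 ≤ row
    · rw [if_pos hg]
      by_cases hb : (((0 : Nat) : Int) = bX ∧ row = bY)
      · rw [if_pos hb]
        by_cases hp : st.getD 0 0 = row - (((0 : Nat) : Int) - ((0 : Nat) : Int))
        · rw [decide_eq_true hp, if_pos (rfl : true = true)]
          have hP : (bY = row - (((0 : Nat) : Int) - bX) ∧ ((0 : Nat) : Int) ≤ bX ∧ bX ≤ ((0 : Nat) : Int)) :=
            ⟨by omega, by omega, by omega⟩
          show false = (decide (0 ≤ st.getD 0 0) &&
            !decide (bY = row - (((0 : Nat) : Int) - bX) ∧ ((0 : Nat) : Int) ≤ bX ∧ bX ≤ ((0 : Nat) : Int)))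
          rw [decide_eq_true hP]
          simp
        · rw [decide_eq_false hp, if_neg Bool.false_ne_true]
      · rw [if_neg hb]
        by_cases hp : st.getD 0 0 = row
        · have hp' : st.getD 0 0 = row - (((0 : Nat) : Int) - ((0 : Nat) : Int)) := by omega
          rw [if_pos hp, decide_eq_true hp', if_pos (rfl : true = true)]
          have hP : ¬ (bY = row - (((0 : Nat) : Int) - bX) ∧ ((0 : Nat) : Int) ≤ bX ∧ bX ≤ ((0 : Nat) : Int)) := by
            rintro ⟨e1, e2, e3⟩
            exact hb ⟨by omega, by omega⟩
          have hlt : 0 ≤ st.getD 0 0 := by omega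
          show true = (decide (0 ≤ st.getD 0 0) &&
            !decide (bY = row - (((0 : Nat) : Int) - bX) ∧ ((0 : Nat) : Int) ≤ bX ∧ bX ≤ ((0 : Nat) : Int)))
          rw [decide_eq_true hlt, decide_eq_false hP]
          rfl
        · have hp' : ¬ st.getD 0 0 = row - (((0 : Nat) : Int) - ((0 : Nat) : Int)) := by omega
          rw [if_neg hp, decide_eq_false hp', if_neg Bool.false_ne_true]
    · rw [if_neg hg]
      by_cases hp : st.getD 0 0 = row - (((0 : Nat) : Int) - ((0 : Nat) : Int))
      · rw [decide_eq_true hp, if_pos (rfl : true = true)]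
        have hge : ¬ (0 ≤ st.getD 0 0) := by omega
        show false = (decide (0 ≤ st.getD 0 0) && _)
        rw [decide_eq_false hge]
        rfl
      · rw [decide_eq_false hp, if_neg Bool.false_ne_true]
  | succ k ih =>
    intro row
    rw [loopDL]
    show _ =
      match (if decide (st.getD (k+1) 0 = row - (((k+1 : Nat) : Int) - ((k+1 : Nat) : Int))) then some (k+1)
             else lastB (fun k' => decide (st.getD k' 0 = row - (((k+1 : Nat) : Int) - (k' : Int)))) (k+1)) with
      | none => false
      | some l => decide (0 ≤ st.getD l 0) &&
          !decide (bY = row - (((k+1 : Nat) : Int) - bX) ∧ (l : Int) ≤ bX ∧ bX ≤ ((k+1 : Nat) : Int))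
    by_cases hg : 0 ≤ row
    · rw [if_pos hg]
      by_cases hb : (((k+1 : Nat) : Int) = bX ∧ row = bY)
      · rw [if_pos hb]
        by_cases hp : st.getD (k+1) 0 = row - (((k+1 : Nat) : Int) - ((k+1 : Nat) : Int))
        · rw [decide_eq_true hp, if_pos (rfl : true = true)]
          have hP : (bY = row - (((k+1 : Nat) : Int) - bX) ∧ ((k+1 : Nat) : Int) ≤ bX ∧ bX ≤ ((k+1 : Nat) : Int)) :=
            ⟨by omega, by omega, by omega⟩
          show false = (decide (0 ≤ st.getD (k+1) 0) &&
            !decide (bY = row - (((k+1 : Nat) : Int) - bX) ∧ ((k+1 : Nat) : Int) ≤ bX ∧ bX ≤ ((k+1 : Nat) : Int)))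
          rw [decide_eq_true hP]
          simp
        · rw [decide_eq_false hp, if_neg Bool.false_ne_true]
          cases hr : lastB (fun k' => decide (st.getD k' 0 = row - (((k+1 : Nat) : Int) - (k' : Int)))) (k+1) with
          | none => rfl
          | some l =>
            obtain ⟨h1, h2⟩ := lastB_some hr
            have hP : (bY = row - (((k+1 : Nat) : Int) - bX) ∧ (l : Int) ≤ bX ∧ bX ≤ ((k+1 : Nat) : Int)) :=
              ⟨by omega, by omega, by omega⟩
            show false = (decide (0 ≤ st.getD l 0) &&
              !decide (bY = row - (((k+1 : Nat) : Int) - bX) ∧ (l : Int) ≤ bX ∧ bX ≤ ((k+1 : Nat) : Int)))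
            rw [decide_eq_true hP]
            simp
      · rw [if_neg hb]
        by_cases hp : st.getD (k+1) 0 = row
        · have hp' : st.getD (k+1) 0 = row - (((k+1 : Nat) : Int) - ((k+1 : Nat) : Int)) := by omega
          rw [if_pos hp, decide_eq_true hp', if_pos (rfl : true = true)]
          have hP : ¬ (bY = row - (((k+1 : Nat) : Int) - bX) ∧ ((k+1 : Nat) : Int) ≤ bX ∧ bX ≤ ((k+1 : Nat) : Int)) := by
            rintro ⟨e1, e2, e3⟩
            exact hb ⟨by omega, by omega⟩
          have hlt : 0 ≤ st.getD (k+1) 0 := by omega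
          show true = (decide (0 ≤ st.getD (k+1) 0) &&
            !decide (bY = row - (((k+1 : Nat) : Int) - bX) ∧ ((k+1 : Nat) : Int) ≤ bX ∧ bX ≤ ((k+1 : Nat) : Int)))
          rw [decide_eq_true hlt, decide_eq_false hP]
          rfl
        · have hp' : ¬ st.getD (k+1) 0 = row - (((k+1 : Nat) : Int) - ((k+1 : Nat) : Int)) := by omega
          rw [if_neg hp, decide_eq_false hp', if_neg Bool.false_ne_true]
          rw [ih (row-1)]
          have hpe : (fun k' => decide (st.getD k' 0 = (row-1) - ((k : Int) - (k' : Int))))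
                   = (fun k' => decide (st.getD k' 0 = row - (((k+1 : Nat) : Int) - (k' : Int)))) := by
            funext k'
            apply decide_eq_decide.mpr
            constructor <;> intro h <;> omega
          rw [hpe]
          cases hr : lastB (fun k' => decide (st.getD k' 0 = row - (((k+1 : Nat) : Int) - (k' : Int)))) (k+1) with
          | none => rfl
          | some l =>
            show (decide (0 ≤ st.getD l 0) &&
                   !decide (bY = (row-1) - ((k : Int) - bX) ∧ (l : Int) ≤ bX ∧ bX ≤ (k : Int)))
               = (decide (0 ≤ st.getD l 0) &&
                   !decide (bY = row - (((k+1 : Nat) : Int) - bX) ∧ (l : Int) ≤ bX ∧ bX ≤ ((k+1 : Nat) : Int)))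
            congr 1
            congr 1
            apply decide_eq_decide.mpr
            constructor
            · rintro ⟨e1, e2, e3⟩; exact ⟨by omega, e2, by omega⟩
            · rintro ⟨e1, e2, e3⟩
              by_cases hc : ((k+1 : Nat) : Int) = bX
              · exact absurd ⟨hc, by omega⟩ hb
              · exact ⟨by omega, e2, by omega⟩
    · rw [if_neg hg]
      by_cases hp : st.getD (k+1) 0 = row - (((k+1 : Nat) : Int) - ((k+1 : Nat) : Int))
      · rw [decide_eq_true hp, if_pos (rfl : true = true)]
        have hge : ¬ (0 ≤ st.getD (k+1) 0) := by omega
        show false = (decide (0 ≤ st.getD (k+1) 0) && _)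
        rw [decide_eq_false hge]
        rfl
      · rw [decide_eq_false hp, if_neg Bool.false_ne_true]
        cases hr : lastB (fun k' => decide (st.getD k' 0 = row - (((k+1 : Nat) : Int) - (k' : Int)))) (k+1) with
        | none => rfl
        | some l =>
          obtain ⟨h1, h2⟩ := lastB_some hr
          have h2' : st.getD l 0 = row - (((k+1 : Nat) : Int) - (l : Int)) := of_decide_eq_true h2
          have hge : ¬ (0 ≤ st.getD l 0) := by omega
          show false = (decide (0 ≤ st.getD l 0) && _)
          rw [decide_eq_false hge]
          rfl

theorem nxtGo_spec (keys : List Int) : ∀ (j : Nat) (last : PySem.Dict Int Nat) (acc : List (Option Nat)),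
    j < keys.length →
    (∀ c : Int, last.get? c = firstFrom (fun k => decide (keys.getD k 0 = c)) keys.length (j+1)) →
    nxtGo keys j last acc =
      (List.range (j+1)).map
        (fun t => firstFrom (fun k => decide (keys.getD k 0 = keys.getD t 0)) keys.length (t+1)) ++ acc := by
  intro j
  induction j with
  | zero =>
    intro last acc _ hinv
    rw [nxtGo]
    simp only [List.range_succ, List.range_zero, List.map, List.nil_append, List.map_cons]
    rw [hinv (keys.getD 0 0)]
    rfl
  | succ j ih =>
    intro last acc hj hinv
    rw [nxtGo]
    have hj' : j < keys.length := by omega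
    have hinv' : ∀ c : Int,
        (last.insert (keys.getD (j+1) 0) (j+1)).get? c
          = firstFrom (fun k => decide (keys.getD k 0 = c)) keys.length (j+1) := by
      intro c
      rw [PySem.Dict.get?_insert]
      rw [firstFrom, dif_pos hj]
      by_cases hc : c = keys.getD (j+1) 0
      · rw [if_pos hc]
        have : decide (keys.getD (j+1) 0 = c) = true := decide_eq_true hc.symm
        rw [this, if_pos (rfl : true = true)]
      · rw [if_neg hc]
        have : decide (keys.getD (j+1) 0 = c) = false := decide_eq_false (fun h => hc h.symm)
        rw [this, if_neg Bool.false_ne_true]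
        exact hinv c
    rw [ih (last.insert (keys.getD (j+1) 0) (j+1)) (last.get? (keys.getD (j+1) 0) :: acc) hj' hinv']
    rw [hinv (keys.getD (j+1) 0)]
    rw [List.range_succ (n := j+1)]
    simp

theorem nearestNext_spec (keys : List Int) :
    nearestNext keys =
      (List.range keys.length).map
        (fun t => firstFrom (fun k => decide (keys.getD k 0 = keys.getD t 0)) keys.length (t+1)) := by
  unfold nearestNext
  split
  · next hn => rw [hn]; rfl
  · next n hn =>
    have hinv : ∀ c : Int,
        (PySem.Dict.empty (κ := Int) (ν := Nat)).get? c
          = firstFrom (fun k => decide (keys.getD k 0 = c)) keys.length (n+1) := by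
      intro c
      rw [PySem.Dict.get?_empty, firstFrom, dif_neg (by omega)]
    rw [nxtGo_spec keys n PySem.Dict.empty [] (by omega) hinv, hn]
    simp

theorem prvGo_spec (keys : List Int) : ∀ (j : Nat) (last : PySem.Dict Int Nat) (acc : List (Option Nat)),
    (∀ c : Int, last.get? c = lastB (fun k => decide (keys.getD k 0 = c)) j) →
    prvGo keys j last acc =
      acc ++ (List.range (keys.length - j)).map
        (fun t => lastB (fun k => decide (keys.getD k 0 = keys.getD (j+t) 0)) (j+t)) := by
  intro j
  induction hm : keys.length - j using Nat.strong_induction_on generalizing j with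
  | _ m ih =>
    intro last acc hinv
    subst hm
    rw [prvGo]
    by_cases hj : j < keys.length
    · rw [dif_pos hj]
      have hinv' : ∀ c : Int,
          (last.insert (keys.getD j 0) j).get? c
            = lastB (fun k => decide (keys.getD k 0 = c)) (j+1) := by
        intro c
        rw [PySem.Dict.get?_insert, lastB]
        by_cases hc : c = keys.getD j 0
        · rw [if_pos hc]
          have : decide (keys.getD j 0 = c) = true := decide_eq_true hc.symm
          rw [this, if_pos (rfl : true = true)]
        · rw [if_neg hc]
          have : decide (keys.getD j 0 = c) = false := decide_eq_false (fun h => hc h.symm)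
          rw [this, if_neg Bool.false_ne_true]
          exact hinv c
      rw [ih (keys.length - (j+1)) (by omega) (j+1) rfl (last.insert (keys.getD j 0) j)
        (acc ++ [last.get? (keys.getD j 0)]) hinv']
      rw [hinv (keys.getD j 0)]
      rw [List.append_assoc]
      congr 1
      have hlen : keys.length - j = (keys.length - (j+1)) + 1 := by omega
      rw [hlen, List.range_succ_eq_map]
      simp only [List.map_cons, List.map_map, Nat.add_zero, List.cons_append, List.nil_append]
      congr 1
      apply List.map_congr_left
      intro t _
      simp only [Function.comp]
      have : j + Nat.succ t = j + 1 + t := by omega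
      rw [this]
    · rw [dif_neg hj]
      have : keys.length - j = 0 := by omega
      rw [this]
      simp

theorem nearestPrev_spec (keys : List Int) :
    nearestPrev keys =
      (List.range keys.length).map
        (fun t => lastB (fun k => decide (keys.getD k 0 = keys.getD t 0)) t) := by
  unfold nearestPrev
  have hinv : ∀ c : Int,
      (PySem.Dict.empty (κ := Int) (ν := Nat)).get? c
        = lastB (fun k => decide (keys.getD k 0 = c)) 0 := by
    intro c
    rw [PySem.Dict.get?_empty]; rfl
  rw [prvGo_spec keys 0 PySem.Dict.empty [] hinv]
  simp

theorem bor_congr {a a' b b' : Bool} (h1 : a = a') (h2 : b = b') : (a || b) = (a' || b') := by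
  subst h1; subst h2; rfl

theorem bnot_congr {a b : Bool} (h : a = b) : (!a) = (!b) := by subst h; rfl

theorem band_congr {a a' b b' : Bool} (h1 : a = a') (h2 : b = b') : (a && b) = (a' && b') := by
  subst h1; subst h2; rfl

theorem loopLFrom_spec (st : List Int) (bX bY item : Int) (i : Nat) :
    loopLFrom st bX bY item i =
      match lastB (fun m => decide (st.getD m 0 = item)) i with
      | none => false
      | some l => !decide (item = bY ∧ (l : Int) ≤ bX ∧ bX < (i : Int)) := by
  cases i with
  | zero => rfl
  | succ k =>
    show loopL st bX bY item k = _
    rw [loopL_spec]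
    cases hr : lastB (fun m => decide (st.getD m 0 = item)) (k+1) with
    | none => rfl
    | some l =>
      exact bnot_congr (decide_eq_decide.mpr
        (by constructor <;> (rintro ⟨e1, e2, e3⟩; exact ⟨e1, e2, by omega⟩)))

theorem loopULFrom_spec (st : List Int) (bX bY : Int) (i : Nat) (row : Int) :
    loopULFrom st bX bY i row =
      match lastB (fun m => decide (st.getD m 0 = row - 1 + ((i : Int) - (m : Int)))) i with
      | none => false
      | some l => decide (st.getD l 0 < (st.length : Int)) &&
          !decide (bY = row - 1 + ((i : Int) - bX) ∧ (l : Int) ≤ bX ∧ bX < (i : Int)) := by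
  cases i with
  | zero => rfl
  | succ k =>
    show loopUL st bX bY k row = _
    rw [loopUL_spec]
    have hp : (fun m => decide (st.getD m 0 = row + ((k : Int) - (m : Int))))
            = (fun m => decide (st.getD m 0 = row - 1 + (((k+1 : Nat) : Int) - (m : Int)))) :=
      funext fun m => decide_eq_decide.mpr (by omega)
    rw [hp]
    cases hr : lastB (fun m => decide (st.getD m 0 = row - 1 + (((k+1 : Nat) : Int) - (m : Int)))) (k+1) with
    | none => rfl
    | some l =>
      exact band_congr rfl (bnot_congr (decide_eq_decide.mpr
        (by constructor <;> (rintro ⟨e1, e2, e3⟩; exact ⟨by omega, e2, by omega⟩))))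

theorem loopDLFrom_spec (st : List Int) (bX bY : Int) (i : Nat) (row : Int) :
    loopDLFrom st bX bY i row =
      match lastB (fun m => decide (st.getD m 0 = row + 1 - ((i : Int) - (m : Int)))) i with
      | none => false
      | some l => decide (0 ≤ st.getD l 0) &&
          !decide (bY = row + 1 - ((i : Int) - bX) ∧ (l : Int) ≤ bX ∧ bX < (i : Int)) := by
  cases i with
  | zero => rfl
  | succ k =>
    show loopDL st bX bY k row = _
    rw [loopDL_spec]
    have hp : (fun m => decide (st.getD m 0 = row - ((k : Int) - (m : Int))))
            = (fun m => decide (st.getD m 0 = row + 1 - (((k+1 : Nat) : Int) - (m : Int)))) :=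
      funext fun m => decide_eq_decide.mpr (by omega)
    rw [hp]
    cases hr : lastB (fun m => decide (st.getD m 0 = row + 1 - (((k+1 : Nat) : Int) - (m : Int)))) (k+1) with
    | none => rfl
    | some l =>
      exact band_congr rfl (bnot_congr (decide_eq_decide.mpr
        (by constructor <;> (rintro ⟨e1, e2, e3⟩; exact ⟨by omega, e2, by omega⟩))))

theorem f_eq_alt (st : List Int) (bX bY : Int) : f st bX bY = f_alt st bX bY := by
  unfold f f_alt
  simp only [nearestNext_spec, nearestPrev_spec, List.length_map, List.length_range]
  apply PySem.List.foldl_congr_mem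
  intro acc i hi
  rw [List.mem_range] at hi
  refine congrArg (fun b : Bool => if b then acc + 1 else acc) ?_
  simp only [PySem.List.getD_map_range _ _ _ _ hi]
  rw [loopR_spec, loopUR_spec, loopDR_spec, loopLFrom_spec, loopULFrom_spec, loopDLFrom_spec]
  simp only [Bool.if_true_left, Bool.decide_eq_true]
  have hin : ∀ m : Nat, m < i → m < st.length := fun m hm => Nat.lt_trans hm hi
  have h3 : firstFrom (fun m => decide ((List.map (fun j => st.getD j 0 - (j : Int)) (List.range st.length)).getD m 0
                = st.getD i 0 - (i : Int))) st.length (i+1)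
          = firstFrom (fun m => decide (st.getD m 0 = st.getD i 0 + 1 + ((m : Int) - ((i+1 : Nat) : Int)))) st.length (i+1) :=
    firstFrom_congr (fun m hm => by
      rw [PySem.List.getD_map_range _ _ _ _ hm]
      exact decide_eq_decide.mpr (by omega)) _
  have h4 : firstFrom (fun m => decide ((List.map (fun j => st.getD j 0 + (j : Int)) (List.range st.length)).getD m 0
                = st.getD i 0 + (i : Int))) st.length (i+1)
          = firstFrom (fun m => decide (st.getD m 0 = st.getD i 0 - 1 - ((m : Int) - ((i+1 : Nat) : Int)))) st.length (i+1) :=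
    firstFrom_congr (fun m hm => by
      rw [PySem.List.getD_map_range _ _ _ _ hm]
      exact decide_eq_decide.mpr (by omega)) _
  have h5 : lastB (fun m => decide ((List.map (fun j => st.getD j 0 + (j : Int)) (List.range st.length)).getD m 0
                = st.getD i 0 + (i : Int))) i
          = lastB (fun m => decide (st.getD m 0 = st.getD i 0 + 1 - 1 + ((i : Int) - (m : Int)))) i :=
    lastB_congr i (fun m hm => by
      rw [PySem.List.getD_map_range _ _ _ _ (hin m hm)]
      exact decide_eq_decide.mpr (by omega))
  have h6 : lastB (fun m => decide ((List.map (fun j => st.getD j 0 - (j : Int)) (List.range st.length)).getD m 0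
                = st.getD i 0 - (i : Int))) i
          = lastB (fun m => decide (st.getD m 0 = st.getD i 0 - 1 + 1 - ((i : Int) - (m : Int)))) i :=
    lastB_congr i (fun m hm => by
      rw [PySem.List.getD_map_range _ _ _ _ (hin m hm)]
      exact decide_eq_decide.mpr (by omega))
  rw [h3, h4, h5, h6]
  refine bor_congr (bor_congr (bor_congr (bor_congr (bor_congr ?d1 ?d2) ?d3) ?d4) ?d5) ?d6
  case d1 =>
    cases hr : firstFrom (fun m => decide (st.getD m 0 = st.getD i 0)) st.length (i+1) with
    | none => rfl
    | some r =>
      exact bnot_congr (decide_eq_decide.mpr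
        (by constructor <;> (rintro ⟨e1, e2, e3⟩; exact ⟨e1, by omega, e3⟩)))
  case d2 =>
    cases hr : lastB (fun m => decide (st.getD m 0 = st.getD i 0)) i with
    | none => rfl
    | some l =>
      exact bnot_congr (decide_eq_decide.mpr
        (by constructor <;> (rintro ⟨e1, e2, e3⟩; exact ⟨e1, e2, e3⟩)))
  case d3 =>
    cases hr : firstFrom (fun m => decide (st.getD m 0 = st.getD i 0 + 1 + ((m : Int) - ((i+1 : Nat) : Int)))) st.length (i+1) with
    | none => rfl
    | some r =>
      exact band_congr rfl (bnot_congr (decide_eq_decide.mpr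
        (by constructor <;> (rintro ⟨e1, e2, e3⟩; exact ⟨by omega, by omega, e3⟩))))
  case d4 =>
    cases hr : firstFrom (fun m => decide (st.getD m 0 = st.getD i 0 - 1 - ((m : Int) - ((i+1 : Nat) : Int)))) st.length (i+1) with
    | none => rfl
    | some r =>
      exact band_congr rfl (bnot_congr (decide_eq_decide.mpr
        (by constructor <;> (rintro ⟨e1, e2, e3⟩; exact ⟨by omega, by omega, e3⟩))))
  case d5 =>
    cases hr : lastB (fun m => decide (st.getD m 0 = st.getD i 0 + 1 - 1 + ((i : Int) - (m : Int)))) i with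
    | none => rfl
    | some l =>
      exact band_congr rfl (bnot_congr (decide_eq_decide.mpr
        (by constructor <;> (rintro ⟨e1, e2, e3⟩; exact ⟨by omega, e2, e3⟩))))
  case d6 =>
    cases hr : lastB (fun m => decide (st.getD m 0 = st.getD i 0 - 1 + 1 - ((i : Int) - (m : Int)))) i with
    | none => rfl
    | some l =>
      exact band_congr rfl (bnot_congr (decide_eq_decide.mpr
        (by constructor <;> (rintro ⟨e1, e2, e3⟩; exact ⟨by omega, e2, e3⟩))))

-- ===== VERDICT (by name: the statement is the Claim_ definition above) =====
theorem f_spec : Claim_equal_f := by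
  intro state boulderX boulderY _
  unfold Spec_f
  exact f_eq_alt state boulderX boulderY
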